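-- pv_equiv track=rewrite | github.com/Ag3497120/verantyx-v6 | eval_synth_results/2dee498d.py | transform
-- ===== SOURCE A (Python) =====
-- def transform(grid):
--     rows = len(grid)
--     cols = len(grid[0])
--     for p in range(1, cols + 1):
--         if cols % p != 0:
--             continue
--         valid = True
--         for r in range(rows):
--             base = grid[r][:p]
--             base_rev = base[::-1]
--             for k in range(1, cols // p):
--                 chunk = grid[r][k*p:(k+1)*p]
--                 if chunk != base and chunk != base_rev:
--                     valid = False
--                     break
--             if not valid:
--                 break
--         if valid:
--             return [row[:p] for row in grid]
--     return grid
-- ===== SOURCE B (Python) =====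
-- def _row_ok(row, p, cols):
--     base = row[:p]
--     rb = base[::-1]
--     return all(row[k*p:(k+1)*p] in (base, rb) for k in range(1, cols // p))
--
-- def transform(grid):
--     cols = len(grid[0])
--     divisors = [p for p in range(1, cols + 1) if cols % p == 0]
--     common = None
--     for row in grid:
--         s = {p for p in divisors if _row_ok(row, p, cols)}
--         common = s if common is None else common & s
--     if not common:
--         return grid
--     p = min(common)
--     return [row[:p] for row in grid]
-- ===== Notes on version B (the rewrite author's own statement) =====
-- stated objective: alternative
-- what changed: Instead of A's ascending search over periods with nested early-exit row/chunk loops, B computes for each row the set of divisors of the column count that validate it, intersects these per-row sets, and returns the prefix of length min(intersection) (falling back to the grid when there are no divisors, i.e. zero columns).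
-- outside the precondition, e.g. on transform([]): A raises IndexError, B raises IndexError
import Mathlib
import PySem

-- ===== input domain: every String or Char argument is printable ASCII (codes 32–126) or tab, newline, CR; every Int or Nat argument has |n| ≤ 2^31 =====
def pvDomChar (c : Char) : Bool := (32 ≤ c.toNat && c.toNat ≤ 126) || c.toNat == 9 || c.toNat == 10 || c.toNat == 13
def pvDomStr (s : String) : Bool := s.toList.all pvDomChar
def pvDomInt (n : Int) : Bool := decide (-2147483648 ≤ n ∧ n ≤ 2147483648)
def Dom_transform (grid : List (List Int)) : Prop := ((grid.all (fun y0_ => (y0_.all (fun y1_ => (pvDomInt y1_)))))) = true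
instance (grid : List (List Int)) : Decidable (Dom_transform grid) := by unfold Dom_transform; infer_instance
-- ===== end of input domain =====

-- B trades A's ascending early-exit search for per-row divisor-set intersection; objective: alternative (same cost).

-- ===== PORT A =====
-- inner 'for k' loop with the valid-flag early exit
def chunkLoopA (row base baseRev : List Int) (p : Int) : List Int → Bool
  | [] => true
  | k :: ks =>
    let chunk := PySem.List.slice row (some (k * p)) (some ((k + 1) * p))
    if chunk == base || chunk == baseRev then chunkLoopA row base baseRev p ks else false

-- 'for r in range(rows)' loop (structural recursion over the rows themselves)
def rowLoopA (p cols : Int) : List (List Int) → Bool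
  | [] => true
  | row :: rs =>
    let base := PySem.List.slice row none (some p)
    let baseRev := base.reverse
    if chunkLoopA row base baseRev p (PySem.List.pyRange 1 (PySem.Int.floordiv cols p) 1)
    then rowLoopA p cols rs else false

-- 'for p in range(1, cols+1)' loop with the early return
def pLoopA (grid : List (List Int)) (cols : Int) : List Int → List (List Int)
  | [] => grid
  | p :: ps =>
    if PySem.Int.mod cols p != 0 then pLoopA grid cols ps
    else if rowLoopA p cols grid then grid.map (fun row => PySem.List.slice row none (some p))
    else pLoopA grid cols ps

def transform (grid : List (List Int)) : List (List Int) :=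
  let cols : Int := ((PySem.List.pyGet? grid 0).getD []).length
  pLoopA grid cols (PySem.List.pyRange 1 (cols + 1) 1)

-- ===== PORT B =====
def rowOkB (row : List Int) (p cols : Int) : Bool :=
  let base := PySem.List.slice row none (some p)
  let rb := base.reverse
  (PySem.List.pyRange 1 (PySem.Int.floordiv cols p) 1).all (fun k =>
    let c := PySem.List.slice row (some (k * p)) (some ((k + 1) * p))
    c == base || c == rb)

def transform_alt (grid : List (List Int)) : List (List Int) :=
  let cols : Int := ((PySem.List.pyGet? grid 0).getD []).length
  let divisors := (PySem.List.pyRange 1 (cols + 1) 1).filter (fun p => PySem.Int.mod cols p == 0)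
  let common : Option (List Int) := grid.foldl
    (fun acc row =>
      let s := divisors.filter (fun p => rowOkB row p cols)
      some (match acc with
            | none => s
            | some c => c.filter (fun p => s.contains p)))
    none
  match common with
  | none => grid
  | some c =>
    if c.isEmpty then grid
    else
      match PySem.List.min? c (fun p => p) with
      | some p => grid.map (fun row => PySem.List.slice row none (some p))
      | none => grid

-- ===== PRECONDITION & SPEC =====
-- Pre_ excludes only the empty grid, on which A raises IndexError at grid[0].
def Pre_transform (grid : List (List Int)) : Prop := grid ≠ []
instance (grid : List (List Int)) : Decidable (Pre_transform grid) := by unfold Pre_transform; infer_instance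
def pvWitness_transform : List (List Int) := [[1, 2, 2, 1], [3, 3, 3, 3]]

def Spec_transform (grid : List (List Int)) (out : List (List Int)) : Prop := out = transform_alt grid
instance (grid : List (List Int)) (out : List (List Int)) : Decidable (Spec_transform grid out) := by unfold Spec_transform; infer_instance

-- ===== CLAIM (what is proved, stated in full; the proofs are below) =====
def Claim_equal_transform : Prop := ∀ (grid : List (List Int)), Dom_transform grid → Pre_transform grid → Spec_transform grid (transform grid)

-- ===== LEMMAS AND PROOFS =====

-- A's valid-flag chunk loop is the 'all' over the same range
theorem chunkLoopA_eq_all (row base baseRev : List Int) (p : Int) (ks : List Int) :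
    chunkLoopA row base baseRev p ks
      = ks.all (fun k =>
          (PySem.List.slice row (some (k * p)) (some ((k + 1) * p)) == base)
          || (PySem.List.slice row (some (k * p)) (some ((k + 1) * p)) == baseRev)) := by
  induction ks with
  | nil => rfl
  | cons k ks ih =>
    simp only [chunkLoopA, List.all_cons]
    split <;> simp_all

-- the chunk loop on a row computes B's row check
theorem chunk_eq_rowOkB (row : List Int) (p cols : Int) :
    chunkLoopA row (PySem.List.slice row none (some p))
      ((PySem.List.slice row none (some p)).reverse) p
      (PySem.List.pyRange 1 (PySem.Int.floordiv cols p) 1) = rowOkB row p cols := by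
  rw [chunkLoopA_eq_all]; rfl

-- A's row loop is the 'all' of B's per-row check
theorem rowLoopA_eq_all (p cols : Int) (rs : List (List Int)) :
    rowLoopA p cols rs = rs.all (fun row => rowOkB row p cols) := by
  induction rs with
  | nil => rfl
  | cons row rs ih =>
    simp only [rowLoopA, chunk_eq_rowOkB, List.all_cons]
    cases h : rowOkB row p cols <;> simp [ih]

-- A's p loop returns according to the first accepted p
theorem pLoopA_eq_find (grid : List (List Int)) (cols : Int) (ps : List Int) :
    pLoopA grid cols ps
      = match ps.find? (fun p => (PySem.Int.mod cols p == 0) && rowLoopA p cols grid) with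
        | some p => grid.map (fun row => PySem.List.slice row none (some p))
        | none => grid := by
  induction ps with
  | nil => rfl
  | cons p ps ih =>
    simp only [pLoopA, List.find?_cons]
    by_cases h : PySem.Int.mod cols p = 0
    · cases hv : rowLoopA p cols grid <;> simp [h, ih]
    · have h1 : (PySem.Int.mod cols p == 0) = false := by simp [h]
      simp only [h1, Bool.false_and, bne, Bool.not_false, if_true, ih]

theorem find?_eq_head?_filter {α : Type} (l : List α) (q : α → Bool) :
    l.find? q = (l.filter q).head? := by
  induction l with
  | nil => rfl
  | cons x l ih =>
    rw [List.find?_cons, List.filter_cons]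
    cases h : q x
    · simpa using ih
    · simp

-- min? of a strictly increasing list is its head
theorem min?_eq_head?_of_pairwise_lt (c : List Int) (h : c.Pairwise (· < ·)) :
    PySem.List.min? c (fun p => p) = c.head? := by
  cases c with
  | nil => simp [PySem.List.min?_eq_none_iff]
  | cons x t =>
    rcases hm : PySem.List.min? (x :: t) (fun p => p) with _ | m
    · simp [PySem.List.min?_eq_none_iff] at hm
    · have hmem := PySem.List.min?_mem hm
      have hmin := PySem.List.min?_isMin hm x (by simp)
      rcases List.mem_cons.mp hmem with rfl | hmt
      · rfl
      · have := (List.pairwise_cons.mp h).1 m hmt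
        omega

-- B's fold: intersecting the per-row sets filters by the conjunction of the row checks
theorem foldB_invariant (divisors : List Int) (cols : Int) (rs : List (List Int)) (c : List Int)
    (hsub : ∀ p ∈ c, p ∈ divisors) :
    rs.foldl
      (fun acc row =>
        let s := divisors.filter (fun p => rowOkB row p cols)
        some (match acc with
              | none => s
              | some c => c.filter (fun p => s.contains p)))
      (some c)
      = some (c.filter (fun p => rs.all (fun row => rowOkB row p cols))) := by
  induction rs generalizing c with
  | nil => simp
  | cons row rs ih =>
    simp only [List.foldl_cons]
    have hstep : (c.filter (fun p => (divisors.filter (fun q => rowOkB row q cols)).contains p))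
        = c.filter (fun p => rowOkB row p cols) := by
      apply List.filter_congr
      intro p hp
      simp [List.mem_filter, hsub p hp]
    rw [hstep, ih _ (fun p hp => hsub p (List.mem_filter.mp hp).1), List.filter_filter]
    congr 1
    apply List.filter_congr
    intro p _
    simp [Bool.and_comm]

theorem main_core (g0 : List Int) (gs : List (List Int)) (cols : Int) :
    pLoopA (g0 :: gs) cols (PySem.List.pyRange 1 (cols + 1) 1)
      = (let divisors := (PySem.List.pyRange 1 (cols + 1) 1).filter
            (fun p => PySem.Int.mod cols p == 0)
         let common : Option (List Int) := (g0 :: gs).foldl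
            (fun acc row =>
              let s := divisors.filter (fun p => rowOkB row p cols)
              some (match acc with
                    | none => s
                    | some c => c.filter (fun p => s.contains p)))
            none
         match common with
         | none => (g0 :: gs)
         | some c =>
           if c.isEmpty then (g0 :: gs)
           else
             match PySem.List.min? c (fun p => p) with
             | some p => (g0 :: gs).map (fun row => PySem.List.slice row none (some p))
             | none => (g0 :: gs)) := by
  simp only [List.foldl_cons]
  rw [foldB_invariant _ cols gs _ (fun p hp => (List.mem_filter.mp hp).1)]
  rw [pLoopA_eq_find, find?_eq_head?_filter]
  have hflt : ((PySem.List.pyRange 1 (cols + 1) 1).filter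
        (fun p => (PySem.Int.mod cols p == 0) && rowLoopA p cols (g0 :: gs)))
      = (((PySem.List.pyRange 1 (cols + 1) 1).filter (fun p => PySem.Int.mod cols p == 0)).filter
          (fun p => rowOkB g0 p cols)).filter
          (fun p => gs.all (fun row => rowOkB row p cols)) := by
    rw [List.filter_filter, List.filter_filter]
    apply List.filter_congr
    intro p _
    simp [rowLoopA_eq_all, Bool.and_comm]
  set c := (((PySem.List.pyRange 1 (cols + 1) 1).filter (fun p => PySem.Int.mod cols p == 0)).filter
      (fun p => rowOkB g0 p cols)).filter
      (fun p => gs.all (fun row => rowOkB row p cols)) with hcc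
  have hpw : c.Pairwise (· < ·) := by
    rw [hcc]
    apply List.Pairwise.sublist _ (PySem.List.pairwise_lt_pyRange_one 1 (cols + 1))
    exact (List.filter_sublist.trans List.filter_sublist).trans List.filter_sublist
  rw [hflt]
  clear_value c
  cases c with
  | nil => simp
  | cons x t => simp [min?_eq_head?_of_pairwise_lt _ hpw]

theorem transform_eq_alt (grid : List (List Int)) (hne : grid ≠ []) :
    transform grid = transform_alt grid := by
  obtain ⟨g0, gs, rfl⟩ := List.exists_cons_of_ne_nil hne
  simp only [transform, transform_alt]
  exact main_core g0 gs _

-- ===== VERDICT (by name: the statement is the Claim_ definition above) =====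
theorem transform_spec : Claim_equal_transform := by
  intro grid _ hpre
  exact transform_eq_alt grid hpre
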